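-- pv_equiv track=rewrite | github.com/wseungjin/codingTest | programmars/graph/1-fast.py | solution
-- ===== SOURCE A (Python) =====
-- from collections import deque
--
-- def solution(n, edge):
--     graph = {}
--     for i in range(n):
--         graph[i] = []
--     for oneEdge in edge:
--         graph[oneEdge[0]-1].append(oneEdge[1]-1)
--         graph[oneEdge[1]-1].append(oneEdge[0]-1)
--
--     visited = [False] * n
--     visited[0] = True
--
--     queue = deque([0])
--     answer = 0
--
--     while queue:
--         answer = len(queue)
--         for index in range(answer):
--             currentIndex = queue.popleft()
--             for nextIndex in graph[currentIndex]:
--                 if visited[nextIndex] == False: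
--                     visited[nextIndex] = True
--                     queue.append(nextIndex)
--
--     return answer
-- ===== SOURCE B (Python) =====
-- def solution(n, edge):
--     def nbrs(v):
--         out = []
--         for e in edge:
--             if e[0] - 1 == v:
--                 out.append(e[1] - 1)
--             if e[1] - 1 == v:
--                 out.append(e[0] - 1)
--         return out
--
--     seen = [False] * n
--     seen[0] = True
--     order = [(0, 0)]          # BFS order of (node, distance) pairs
--     i = 0
--     while i < len(order):
--         v, d = order[i]
--         i += 1
--         for w in nbrs(v):
--             if not seen[w]:
--                 seen[w] = True
--                 order.append((w, d + 1))
--     m = order[-1][1]          # BFS distances are nondecreasing along order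
--     return sum(d == m for _, d in order)
-- ===== Notes on version B (the rewrite author's own statement) =====
-- stated objective: alternative
-- what changed: B builds no adjacency structure at all (neighbors are recomputed by scanning the raw edge list on demand) and replaces A's layer-batched deque BFS by a single index-pointer walk over a growing list of (node, distance) pairs, reading the answer off as the count of pairs carrying the last (maximal) distance.
import Mathlib
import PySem

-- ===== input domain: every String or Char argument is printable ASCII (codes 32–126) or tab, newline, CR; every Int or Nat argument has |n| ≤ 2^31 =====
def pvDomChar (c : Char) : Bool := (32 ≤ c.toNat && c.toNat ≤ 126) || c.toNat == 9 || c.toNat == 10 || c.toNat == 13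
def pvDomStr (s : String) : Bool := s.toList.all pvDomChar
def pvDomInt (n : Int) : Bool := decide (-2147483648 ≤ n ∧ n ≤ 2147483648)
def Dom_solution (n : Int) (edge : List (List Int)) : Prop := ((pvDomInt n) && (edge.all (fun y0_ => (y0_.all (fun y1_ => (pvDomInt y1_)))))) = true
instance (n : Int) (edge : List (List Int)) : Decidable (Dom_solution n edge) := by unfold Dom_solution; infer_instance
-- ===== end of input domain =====

-- B builds no adjacency structure (neighbors are recomputed by scanning the raw edge list on
-- demand) and replaces A's layer-batched deque BFS by an index-pointer walk over (node, distance)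
-- pairs, counting the pairs with the last (maximal) distance: an alternative decomposition.

-- ===== PORT A =====
-- number of entries still False in the visited array (termination measure of the while loop)
def countFalse (vis : List Bool) : Nat := vis.countP (fun b => b = false)

-- one 'if visited[nextIndex] == False: visited[nextIndex] = True; queue.append(nextIndex)' step;
-- the bounds guard totalizes Python's list indexing (exact under Pre_, where 0 ≤ x < n)
def bfsVisit (s : List Bool × List Int) (x : Int) : List Bool × List Int :=
  if 0 ≤ x ∧ x.toNat < s.1.length ∧ s.1.getD x.toNat true = false then
    (s.1.set x.toNat true, s.2 ++ [x])
  else s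

-- one round of A's while body: pop all len(queue) nodes, collect the freshly visited ones
-- (graph[currentIndex] is g.getD c []; KeyError is impossible under Pre_)
def layerA (g : PySem.Dict Int (List Int)) (vis : List Bool) (q : List Int) :
    List Bool × List Int :=
  q.foldl (fun s c => (g.getD c []).foldl bfsVisit s) (vis, [])

theorem bfsVisit_def (vis : List Bool) (acc : List Int) (w : Int) :
    bfsVisit (vis, acc) w =
      if 0 ≤ w ∧ w.toNat < vis.length ∧ vis.getD w.toNat true = false then
        (vis.set w.toNat true, acc ++ [w])
      else (vis, acc) := rfl

theorem countFalse_set (vis : List Bool) (i : Nat) (hlt : i < vis.length)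
    (hv : vis[i] = false) : countFalse (vis.set i true) + 1 = countFalse vis := by
  unfold countFalse
  rw [List.countP_set hlt]
  have hpos : 0 < vis.countP (fun b => !b) := by
    rw [List.countP_pos_iff]
    exact ⟨vis[i], List.getElem_mem hlt, by simp [hv]⟩
  simp [hv]
  omega

theorem foldl_bfsVisit_measure (ws : List Int) :
    ∀ s : List Bool × List Int,
      countFalse (ws.foldl bfsVisit s).1 + (ws.foldl bfsVisit s).2.length =
        countFalse s.1 + s.2.length := by
  induction ws with
  | nil => intro s; rfl
  | cons w ws ih =>
    intro s
    obtain ⟨vis, acc⟩ := s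
    simp only [List.foldl_cons]
    rw [ih, bfsVisit_def]
    split
    · next h =>
      obtain ⟨h0, hlt, hv⟩ := h
      have hget : vis[w.toNat] = false := by
        rwa [List.getD_eq_getElem _ _ hlt] at hv
      have := countFalse_set vis w.toNat hlt hget
      simp only [List.length_append, List.length_cons, List.length_nil]
      omega
    · rfl

theorem layerA_measure (g : PySem.Dict Int (List Int)) (q : List Int) :
    ∀ vis acc, countFalse (q.foldl (fun s c => (g.getD c []).foldl bfsVisit s) (vis, acc)).1 +
        (q.foldl (fun s c => (g.getD c []).foldl bfsVisit s) (vis, acc)).2.length =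
      countFalse vis + acc.length := by
  induction q with
  | nil => intro vis acc; rfl
  | cons c q ih =>
    intro vis acc
    simp only [List.foldl_cons]
    have h1 := foldl_bfsVisit_measure (g.getD c []) (vis, acc)
    set s1 := (g.getD c []).foldl bfsVisit (vis, acc) with hs1
    rw [ih s1.1 s1.2]
    omega

-- A's while loop; 'answer' threads the value len(queue) captured at the top of each round
def loopA (g : PySem.Dict Int (List Int)) (vis : List Bool) (q : List Int) (answer : Int) :
    Int :=
  if h : q = [] then answer
  else loopA g (layerA g vis q).1 (layerA g vis q).2 (q.length : Int)
termination_by countFalse vis + q.length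
decreasing_by
  have hm := layerA_measure g q vis []
  have : q.length ≠ 0 := by simpa using List.length_pos_iff.mpr h |>.ne'
  simp only [layerA, List.length_nil] at hm ⊢
  omega

-- builds A's dict {0: [], …, n-1: []} then appends both endpoints of every edge;
-- e[0]/e[1] are pyGet? with default (IndexError excluded by Pre_), missing keys (KeyError,
-- excluded by Pre_) are totalized by Dict.modify
def buildGraphA (n : Int) (edge : List (List Int)) : PySem.Dict Int (List Int) :=
  edge.foldl
    (fun g e =>
      let a := (PySem.List.pyGet? e 0).getD 0 - 1
      let b := (PySem.List.pyGet? e 1).getD 0 - 1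
      (g.modify a [] (· ++ [b])).modify b [] (· ++ [a]))
    ((PySem.List.pyRange 0 n 1).foldl (fun g i => g.insert i []) PySem.Dict.empty)

def solution (n : Int) (edge : List (List Int)) : Int :=
  loopA (buildGraphA n edge) ((List.replicate n.toNat false).set 0 true) [0] 0

-- ===== PORT B =====
-- 'def nbrs(v)': one scan of the raw edge list, two membership tests per edge
-- (e[0]/e[1] are pyGet? with default; IndexError excluded by Pre_)
def nbrs (edge : List (List Int)) (v : Int) : List Int :=
  edge.foldl
    (fun out e =>
      (out ++ (if (PySem.List.pyGet? e 0).getD 0 - 1 = v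
                then [(PySem.List.pyGet? e 1).getD 0 - 1] else []))
           ++ (if (PySem.List.pyGet? e 1).getD 0 - 1 = v
                then [(PySem.List.pyGet? e 0).getD 0 - 1] else []))
    []

-- the 'for w in nbrs(v)' body: 'if not seen[w]: seen[w] = True; order.append((w, d + 1))';
-- the bounds guard totalizes Python's indexing (exact under Pre_, where 0 ≤ w < n)
def stepB (d : Int) : List Int → List Bool → List (Int × Int) → List Bool × List (Int × Int)
  | [], seen, order => (seen, order)
  | w :: ws, seen, order =>
    if 0 ≤ w ∧ w.toNat < seen.length ∧ seen.getD w.toNat true = false then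
      stepB d ws (seen.set w.toNat true) (order ++ [(w, d + 1)])
    else stepB d ws seen order

theorem stepB_measure (d : Int) (ws : List Int) (seen : List Bool) (order : List (Int × Int)) :
    countFalse (stepB d ws seen order).1 + (stepB d ws seen order).2.length =
      countFalse seen + order.length ∧
    order.length ≤ (stepB d ws seen order).2.length := by
  induction ws generalizing seen order with
  | nil => exact ⟨rfl, le_rfl⟩
  | cons w ws ih =>
    simp only [stepB]
    split
    · next h =>
      obtain ⟨h0, hlt, hv⟩ := h
      have hget : seen[w.toNat] = false := by
        rwa [List.getD_eq_getElem _ _ hlt] at hv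
      have hset := countFalse_set seen w.toNat hlt hget
      obtain ⟨ih1, ih2⟩ := ih (seen.set w.toNat true) (order ++ [(w, d + 1)])
      simp only [List.length_append, List.length_cons, List.length_nil] at ih1 ih2 ⊢
      omega
    · exact ih seen order

-- B's while loop: the index pointer i walks the growing order list
def loopB (edge : List (List Int)) (seen : List Bool) (order : List (Int × Int)) (i : Nat) :
    List (Int × Int) :=
  if h : i < order.length then
    loopB edge (stepB order[i].2 (nbrs edge order[i].1) seen order).1
      (stepB order[i].2 (nbrs edge order[i].1) seen order).2 (i + 1)
  else order
termination_by countFalse seen + (order.length - i)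
decreasing_by
  obtain ⟨hm1, hm2⟩ := stepB_measure order[i].2 (nbrs edge order[i].1) seen order
  omega

def solution_alt (n : Int) (edge : List (List Int)) : Int :=
  let order := loopB edge ((List.replicate n.toNat false).set 0 true) [(0, 0)] 0
  let m := ((PySem.List.pyGet? order (-1)).getD (0, 0)).2
  ((order.countP (fun p => decide (p.2 = m)) : Nat) : Int)

-- ===== PRECONDITION & SPEC =====
-- Exactly the inputs where Python A returns: n ≥ 1 (else visited[0] = True raises IndexError)
-- and every edge has two endpoints in 1..n (else IndexError on e[0]/e[1] or KeyError in the
-- dict-building loop).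
def Pre_solution (n : Int) (edge : List (List Int)) : Prop :=
  1 ≤ n ∧ ∀ e ∈ edge, 2 ≤ e.length ∧
    1 ≤ e.getD 0 0 ∧ e.getD 0 0 ≤ n ∧ 1 ≤ e.getD 1 0 ∧ e.getD 1 0 ≤ n
instance (n : Int) (edge : List (List Int)) : Decidable (Pre_solution n edge) := by
  unfold Pre_solution; infer_instance

def pvWitness_solution : Int × List (List Int) := (3, [[1, 2], [2, 3]])

def Spec_solution (n : Int) (edge : List (List Int)) (out : Int) : Prop := out = solution_alt n edge
instance (n : Int) (edge : List (List Int)) (out : Int) : Decidable (Spec_solution n edge out) := by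
  unfold Spec_solution; infer_instance

-- ===== CLAIM (what is proved, stated in full; the proofs are below) =====
def Claim_equal_solution : Prop := ∀ (n : Int) (edge : List (List Int)),
  Dom_solution n edge → Pre_solution n edge → Spec_solution n edge (solution n edge)

-- ===== LEMMAS AND PROOFS =====

-- peel lemma for bfsVisit folds; used by stepB_eq and layerA_peel below
theorem foldl_bfsVisit_peel (ws : List Int) :
    ∀ vis acc, ws.foldl bfsVisit (vis, acc) =
      ((ws.foldl bfsVisit (vis, [])).1, acc ++ (ws.foldl bfsVisit (vis, [])).2) := by
  induction ws with
  | nil => intro vis acc; simp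
  | cons w ws ih =>
    intro vis acc
    simp only [List.foldl_cons]
    rw [bfsVisit_def vis acc, bfsVisit_def vis []]
    split
    · rw [ih, ih _ ([] ++ [w])]; simp
    · rw [ih, ih vis []]

theorem stepB_eq (d : Int) (ws : List Int) :
    ∀ seen order, stepB d ws seen order =
      ((ws.foldl bfsVisit (seen, [])).1,
        order ++ ((ws.foldl bfsVisit (seen, [])).2).map (fun v => (v, d + 1))) := by
  induction ws with
  | nil => intro seen order; simp [stepB]
  | cons w ws ih =>
    intro seen order
    simp only [stepB, List.foldl_cons]
    rw [bfsVisit_def seen []]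
    split
    · rw [ih]
      rw [foldl_bfsVisit_peel ws _ ([] ++ [w])]
      simp
    · rw [ih]

-- the successive BFS layers produced by A's while loop (proof-side description of both loops)
def layers (g : PySem.Dict Int (List Int)) (vis : List Bool) (q : List Int) :
    List (List Int) :=
  if h : q = [] then [] else q :: layers g (layerA g vis q).1 (layerA g vis q).2
termination_by countFalse vis + q.length
decreasing_by
  have hm := layerA_measure g q vis []
  have : q.length ≠ 0 := by simpa using List.length_pos_iff.mpr h |>.ne'
  simp only [layerA, List.length_nil] at hm ⊢
  omega

-- layers, each tagged with its distance: tag d [L0, L1, …] = L0×d ++ L1×(d+1) ++ …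
def tag (d : Int) : List (List Int) → List (Int × Int)
  | [] => []
  | L :: Ls => L.map (fun v => (v, d)) ++ tag (d + 1) Ls

theorem layerA_peel (g : PySem.Dict Int (List Int)) (q : List Int) :
    ∀ vis acc, q.foldl (fun s c => (g.getD c []).foldl bfsVisit s) (vis, acc) =
      ((layerA g vis q).1, acc ++ (layerA g vis q).2) := by
  induction q with
  | nil => intro vis acc; simp [layerA]
  | cons c q ih =>
    intro vis acc
    simp only [List.foldl_cons]
    rcases hXF : (g.getD c []).foldl bfsVisit (vis, []) with ⟨X, F⟩
    rw [foldl_bfsVisit_peel (g.getD c []) vis acc, hXF]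
    rw [ih X (acc ++ F)]
    have hcons : layerA g vis (c :: q) = ((layerA g X q).1, F ++ (layerA g X q).2) := by
      show (c :: q).foldl (fun s c => (g.getD c []).foldl bfsVisit s) (vis, []) = _
      simp only [List.foldl_cons]
      rw [hXF, ih X F]
    rw [hcons]
    simp

theorem layerA_cons (g : PySem.Dict Int (List Int)) (vis : List Bool) (c : Int) (q : List Int) :
    layerA g vis (c :: q) =
      ((layerA g ((g.getD c []).foldl bfsVisit (vis, [])).1 q).1,
        ((g.getD c []).foldl bfsVisit (vis, [])).2 ++
          (layerA g ((g.getD c []).foldl bfsVisit (vis, [])).1 q).2) := by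
  rcases hXF : (g.getD c []).foldl bfsVisit (vis, []) with ⟨X, F⟩
  show (c :: q).foldl (fun s c => (g.getD c []).foldl bfsVisit s) (vis, []) = _
  simp only [List.foldl_cons]
  rw [hXF, layerA_peel]

theorem loopB_layer (edge : List (List Int)) (g : PySem.Dict Int (List Int))
    (Hg : ∀ c, g.getD c [] = nbrs edge c) (q : List Int) :
    ∀ (done : List (Int × Int)) (nxt : List Int) (vis : List Bool) (d : Int),
      loopB edge vis
          (done ++ q.map (fun v => (v, d)) ++ nxt.map (fun v => (v, d + 1))) done.length =
        loopB edge (layerA g vis q).1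
          (done ++ q.map (fun v => (v, d)) ++
            (nxt ++ (layerA g vis q).2).map (fun v => (v, d + 1)))
          (done.length + q.length) := by
  induction q with
  | nil => intro done nxt vis d; simp [layerA]
  | cons v q ih =>
    intro done nxt vis d
    rcases hXF : (g.getD v []).foldl bfsVisit (vis, []) with ⟨X, F⟩
    simp only [List.map_cons]
    rw [loopB]
    have hlt : done.length <
        (done ++ ((v, d) :: q.map (fun v => (v, d))) ++ nxt.map (fun v => (v, d + 1))).length := by
      simp
    rw [dif_pos hlt]
    have hget : (done ++ ((v, d) :: q.map (fun v => (v, d))) ++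
        nxt.map (fun v => (v, d + 1)))[done.length]'hlt = (v, d) := by
      simp [List.getElem_append_right (le_refl done.length)]
    rw [hget]
    have hproc : stepB d (nbrs edge v) vis
        (done ++ ((v, d) :: q.map (fun v => (v, d))) ++ nxt.map (fun v => (v, d + 1))) =
        (X, done ++ ((v, d) :: q.map (fun v => (v, d))) ++ nxt.map (fun v => (v, d + 1)) ++
          F.map (fun w => (w, d + 1))) := by
      rw [← Hg v, stepB_eq, hXF]
    rw [hproc]
    have harg : done ++ ((v, d) :: q.map (fun v => (v, d))) ++ nxt.map (fun v => (v, d + 1)) ++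
        F.map (fun w => (w, d + 1)) =
        (done ++ [(v, d)]) ++ q.map (fun v => (v, d)) ++ (nxt ++ F).map (fun v => (v, d + 1)) := by
      simp
    have hlen1 : done.length + 1 = (done ++ [(v, d)]).length := by simp
    rw [harg, hlen1, ih (done ++ [(v, d)]) (nxt ++ F) X d]
    rw [layerA_cons g vis v q, hXF]
    congr 1
    · simp
    · simp
      omega

theorem layers_ne_nil (g : PySem.Dict Int (List Int)) (vis : List Bool) (q : List Int)
    (h : q ≠ []) : layers g vis q ≠ [] := by
  rw [layers]; simp [h]

theorem layers_mem_ne_nil (g : PySem.Dict Int (List Int)) :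
    ∀ vis q, ∀ L ∈ layers g vis q, L ≠ [] := by
  intro vis q
  induction vis, q using layers.induct g with
  | case1 vis => rw [layers]; simp
  | case2 vis q h ih =>
    rw [layers]
    simp only [h, dite_false]
    intro L hL
    rcases List.mem_cons.mp hL with rfl | hL
    · exact h
    · exact ih L hL

theorem getLast?_cons_of_ne_nil {α : Type} (a : α) (l : List α) (h : l ≠ []) :
    (a :: l).getLast? = l.getLast? := by
  rw [show a :: l = [a] ++ l from rfl, List.getLast?_append]
  rcases l with _ | ⟨b, t⟩
  · exact absurd rfl h
  · simp [List.getLast?_cons]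

theorem loopB_eq_tag (edge : List (List Int)) (g : PySem.Dict Int (List Int))
    (Hg : ∀ c, g.getD c [] = nbrs edge c) :
    ∀ vis (q : List Int) (done : List (Int × Int)) (d : Int), q ≠ [] →
      loopB edge vis (done ++ q.map (fun v => (v, d))) done.length =
        done ++ tag d (layers g vis q) := by
  intro vis q
  induction vis, q using layers.induct g with
  | case1 vis => intro done d h; exact absurd rfl h
  | case2 vis q h ih =>
    intro done d _
    have h1 := loopB_layer edge g Hg q done [] vis d
    simp only [List.map_nil, List.append_nil, List.nil_append] at h1
    rw [h1]
    rw [layers]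
    simp only [h, dite_false]
    rcases hq2 : (layerA g vis q).2 with _ | ⟨w, ws⟩
    · simp only [List.map_nil, List.append_nil]
      rw [loopB]
      have hno : ¬ (done.length + q.length <
          (done ++ q.map (fun v => (v, d))).length) := by simp
      rw [dif_neg hno]
      rw [layers]
      simp [tag]
    · have ih' := ih (done ++ q.map (fun v => (v, d))) (d + 1)
      rw [hq2] at ih'
      have ih'' := ih' (by simp)
      simp only [List.append_assoc, List.length_append, List.length_map] at ih'' ⊢
      rw [ih'']
      simp [tag]

theorem loopA_eq_layers (g : PySem.Dict Int (List Int)) :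
    ∀ vis (q : List Int) (ans : Int), q ≠ [] →
      loopA g vis q ans = ((((layers g vis q).getLast?.getD [])).length : Int) := by
  intro vis q
  induction vis, q using layers.induct g with
  | case1 vis => intro ans h; exact absurd rfl h
  | case2 vis q h ih =>
    intro ans _
    rw [loopA]
    simp only [h, dite_false]
    rw [layers]
    simp only [h, dite_false]
    rcases hq2 : (layerA g vis q).2 with _ | ⟨w, ws⟩
    · rw [loopA]
      simp [layers]
    · rw [hq2] at ih
      rw [ih _ (by simp)]
      rw [getLast?_cons_of_ne_nil _ _ (layers_ne_nil g _ _ (by simp))]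

theorem tag_getLast (Ls : List (List Int)) :
    ∀ d : Int, Ls ≠ [] → (∀ L ∈ Ls, L ≠ []) →
      ∃ x, (tag d Ls).getLast? = some (x, d + (Ls.length : Int) - 1) := by
  induction Ls with
  | nil => intro d h _; exact absurd rfl h
  | cons L Ls ih =>
    intro d _ hmem
    by_cases hLs : Ls = []
    · subst hLs
      have hL : L ≠ [] := hmem L (by simp)
      rcases hy : L.getLast? with _ | y
      · exact absurd (List.getLast?_eq_none_iff.mp hy) hL
      · refine ⟨y, ?_⟩
        simp [tag, List.getLast?_map, hy]
    · obtain ⟨x, hx⟩ := ih (d + 1) hLs (fun L hL => hmem L (by simp [hL]))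
      refine ⟨x, ?_⟩
      show (L.map (fun v => (v, d)) ++ tag (d + 1) Ls).getLast? = _
      rw [List.getLast?_append, hx]
      have heq : d + 1 + (Ls.length : Int) - 1 = d + ((L :: Ls).length : Int) - 1 := by
        simp
        ring
      rw [heq]
      simp

theorem tag_countP (Ls : List (List Int)) :
    ∀ d : Int, Ls ≠ [] →
      (tag d Ls).countP (fun p => decide (p.2 = d + (Ls.length : Int) - 1)) =
        (Ls.getLast?.getD []).length := by
  induction Ls with
  | nil => intro d h; exact absurd rfl h
  | cons L Ls ih =>
    intro d _
    by_cases hLs : Ls = []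
    · subst hLs
      show (L.map (fun v => (v, d)) ++ tag (d + 1) []).countP _ = _
      simp [tag, List.countP_map, List.countP_eq_length, List.getLast?_cons]
    · have hlpos : 1 ≤ Ls.length := by
        rcases Ls with _ | _
        · exact absurd rfl hLs
        · simp
      show (L.map (fun v => (v, d)) ++ tag (d + 1) Ls).countP _ = _
      rw [List.countP_append]
      have h1 : (L.map (fun v => (v, d))).countP
          (fun p => decide (p.2 = d + ((L :: Ls).length : Int) - 1)) = 0 := by
        rw [List.countP_eq_zero]
        intro p hp
        simp only [List.mem_map] at hp
        obtain ⟨v, _, rfl⟩ := hp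
        simp only [decide_eq_true_eq, List.length_cons]
        push_cast
        omega
      have h2 := ih (d + 1) hLs
      have heq : d + 1 + (Ls.length : Int) - 1 = d + ((L :: Ls).length : Int) - 1 := by
        simp
        ring
      rw [heq] at h2
      rw [h1, h2, getLast?_cons_of_ne_nil _ _ hLs]
      omega

theorem dict_init_getD (l : List Int) :
    ∀ g : PySem.Dict Int (List Int), (∀ c, g.getD c [] = []) →
      ∀ c, (l.foldl (fun g i => g.insert i []) g).getD c [] = [] := by
  induction l with
  | nil => intro g hg c; exact hg c
  | cons i l ih =>
    intro g hg c
    simp only [List.foldl_cons]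
    refine ih _ (fun c => ?_) c
    rw [PySem.Dict.getD_insert]
    split <;> simp [hg]

-- one edge appended on the A side adds exactly the two conditional singletons nbrs scans for
theorem build_step (g : PySem.Dict Int (List Int)) (a b : Int) (c : Int) :
    ((g.modify a [] (· ++ [b])).modify b [] (· ++ [a])).getD c [] =
      (g.getD c [] ++ (if a = c then [b] else [])) ++ (if b = c then [a] else []) := by
  by_cases hca : a = c <;> by_cases hcb : b = c <;>
    simp [PySem.Dict.getD_modify, hca, hcb, Ne.symm]

theorem build_fold_agree (es : List (List Int)) :
    ∀ (g : PySem.Dict Int (List Int)) (F : Int → List Int),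
      (∀ c, g.getD c [] = F c) →
      ∀ c,
        (es.foldl (fun g e =>
          let a := (PySem.List.pyGet? e 0).getD 0 - 1
          let b := (PySem.List.pyGet? e 1).getD 0 - 1
          (g.modify a [] (· ++ [b])).modify b [] (· ++ [a])) g).getD c [] =
        F c ++ es.flatMap (fun e =>
          (if (PySem.List.pyGet? e 0).getD 0 - 1 = c
            then [(PySem.List.pyGet? e 1).getD 0 - 1] else []) ++
          (if (PySem.List.pyGet? e 1).getD 0 - 1 = c
            then [(PySem.List.pyGet? e 0).getD 0 - 1] else [])) := by
  induction es with
  | nil => intro g F hg c; simp [hg c]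
  | cons e es ih =>
    intro g F hg c
    simp only [List.foldl_cons, List.flatMap_cons]
    rw [ih _ (fun c => (F c ++ (if (PySem.List.pyGet? e 0).getD 0 - 1 = c
            then [(PySem.List.pyGet? e 1).getD 0 - 1] else [])) ++
          (if (PySem.List.pyGet? e 1).getD 0 - 1 = c
            then [(PySem.List.pyGet? e 0).getD 0 - 1] else []))
        (fun c => by rw [build_step, hg c]) c]
    simp

theorem build_agree (n : Int) (edge : List (List Int)) :
    ∀ c, (buildGraphA n edge).getD c [] = nbrs edge c := by
  intro c
  unfold buildGraphA nbrs
  rw [build_fold_agree edge _ (fun _ => [])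
    (dict_init_getD _ _ (fun c => PySem.Dict.getD_empty c []))]
  have hfun : ∀ (out : List Int) (e : List Int), e ∈ edge →
      ((out ++ (if (PySem.List.pyGet? e 0).getD 0 - 1 = c
                 then [(PySem.List.pyGet? e 1).getD 0 - 1] else []))
            ++ (if (PySem.List.pyGet? e 1).getD 0 - 1 = c
                 then [(PySem.List.pyGet? e 0).getD 0 - 1] else [])) =
        out ++ ((if (PySem.List.pyGet? e 0).getD 0 - 1 = c
                  then [(PySem.List.pyGet? e 1).getD 0 - 1] else []) ++
                (if (PySem.List.pyGet? e 1).getD 0 - 1 = c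
                  then [(PySem.List.pyGet? e 0).getD 0 - 1] else [])) :=
    fun out e _ => by simp
  have h1 := PySem.List.foldl_congr_mem edge
    (fun out e =>
      (out ++ (if (PySem.List.pyGet? e 0).getD 0 - 1 = c
                then [(PySem.List.pyGet? e 1).getD 0 - 1] else []))
           ++ (if (PySem.List.pyGet? e 1).getD 0 - 1 = c
                then [(PySem.List.pyGet? e 0).getD 0 - 1] else []))
    (fun out e =>
      out ++ ((if (PySem.List.pyGet? e 0).getD 0 - 1 = c
                then [(PySem.List.pyGet? e 1).getD 0 - 1] else []) ++
              (if (PySem.List.pyGet? e 1).getD 0 - 1 = c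
                then [(PySem.List.pyGet? e 0).getD 0 - 1] else [])))
    [] (fun out e he => hfun out e he)
  rw [h1, PySem.List.foldl_append_eq_flatMap]

-- ===== VERDICT (by name: the statement is the Claim_ definition above) =====
theorem solution_spec : Claim_equal_solution := by
  intro n edge hdom hpre
  unfold Spec_solution
  have Hg := build_agree n edge
  have h01 : ([0] : List Int) ≠ [] := by simp
  have hne : layers (buildGraphA n edge) ((List.replicate n.toNat false).set 0 true) [0] ≠ [] :=
    layers_ne_nil _ _ _ h01
  have hmem := layers_mem_ne_nil (buildGraphA n edge) ((List.replicate n.toNat false).set 0 true) [0]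
  obtain ⟨x, hx⟩ := tag_getLast _ 0 hne hmem
  have hA := loopA_eq_layers (buildGraphA n edge)
    ((List.replicate n.toNat false).set 0 true) [0] 0 h01
  have hB := loopB_eq_tag edge (buildGraphA n edge) Hg
    ((List.replicate n.toNat false).set 0 true) [0] [] 0 h01
  simp only [List.map_cons, List.map_nil, List.nil_append, List.length_nil] at hB
  simp only [solution, solution_alt]
  rw [hA, hB, PySem.List.pyGet?_neg_one, hx]
  simp only [Option.getD_some]
  congr 1
  exact (tag_countP _ 0 hne).symm
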